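-- pv_equiv track=rewrite | github.com/FedorSannikov1988/Getting_to_know_Python | homework4/main4.py | dictionary_to_do_int_list
-- ===== SOURCE A (Python) =====
-- def dictionary_to_do_int_list(dictionary) -> list:
--
--     resalt_list = list()
--
--     for count in range(0, max(list(dictionary.keys()))+1, 1):
--         if count in dictionary:
--             resalt_list.append(dictionary[count])
--         else:
--             resalt_list.append(0)
--
--     resalt_list.reverse()
--
--     return resalt_list
-- ===== SOURCE B (Python) =====
-- def dictionary_to_do_int_list(dictionary) -> list:
--     m = max(dictionary.keys())
--     result = [0] * (m + 1)
--     for k, v in dictionary.items():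
--         if 0 <= k <= m:
--             result[k] = v
--     result.reverse()
--     return result
-- ===== Notes on version B (the rewrite author's own statement) =====
-- stated objective: faster
-- what changed: Instead of scanning every index 0..max(keys) and probing the dict at each, B allocates [0]*(max+1) once and scatters the dict's own entries into their slots, then reverses; Pre_ excludes the empty dict (max() raises ValueError in both) and association lists with duplicate keys, which do not represent a Python dict.
-- outside the precondition, e.g. on dictionary_to_do_int_list({}): A raises ValueError, B raises ValueError
import Mathlib
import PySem

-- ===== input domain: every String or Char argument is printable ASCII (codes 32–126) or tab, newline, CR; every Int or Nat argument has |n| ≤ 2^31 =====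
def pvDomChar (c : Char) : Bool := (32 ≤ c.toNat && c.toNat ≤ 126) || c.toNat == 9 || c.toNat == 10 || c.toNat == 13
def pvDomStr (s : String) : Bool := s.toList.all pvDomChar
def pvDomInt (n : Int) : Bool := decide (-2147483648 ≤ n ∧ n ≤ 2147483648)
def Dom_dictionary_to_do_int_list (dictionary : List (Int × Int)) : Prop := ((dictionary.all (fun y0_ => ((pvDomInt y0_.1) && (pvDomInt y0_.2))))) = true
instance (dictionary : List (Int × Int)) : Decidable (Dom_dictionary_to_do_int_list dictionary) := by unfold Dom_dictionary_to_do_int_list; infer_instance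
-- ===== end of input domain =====

-- B replaces A's scan of every index 0..max(keys) (a dict probe per index) by one
-- allocation [0]*(max+1) and a single scatter pass over the dict's entries; same values, simpler traversal.

-- ===== PORT A =====
def dictionary_to_do_int_list (dictionary : List (Int × Int)) : List Int :=
  match PySem.List.max? (dictionary.map Prod.fst) (fun k => k) with
  | none => []   -- empty dict: Python's max() raises ValueError; excluded by Pre_
  | some m =>
    let resalt_list : List Int :=
      (PySem.List.pyRange 0 (m + 1) 1).foldl
        (fun acc count =>
          match PySem.Dict.get? (PySem.Dict.mk dictionary) count with
          | some v => acc ++ [v]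
          | none   => acc ++ [0]) []
    resalt_list.reverse

-- ===== PORT B =====
def dictionary_to_do_int_list_alt (dictionary : List (Int × Int)) : List Int :=
  match PySem.List.max? (dictionary.map Prod.fst) (fun k => k) with
  | none => []   -- empty dict: max() raises ValueError; excluded by Pre_
  | some m =>
    let result : List Int := List.replicate (m + 1).toNat 0
    let result := dictionary.foldl
      (fun r kv => if 0 ≤ kv.1 ∧ kv.1 ≤ m then r.set kv.1.toNat kv.2 else r) result
    result.reverse

-- ===== PRECONDITION & SPEC =====
-- Pre_ excludes the empty dict, on which A's max() raises ValueError, and association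
-- lists with duplicate keys, which do not represent a Python dict (first-vs-last match is accidental).
def Pre_dictionary_to_do_int_list (dictionary : List (Int × Int)) : Prop :=
  dictionary ≠ [] ∧ (dictionary.map Prod.fst).Nodup
instance (dictionary : List (Int × Int)) : Decidable (Pre_dictionary_to_do_int_list dictionary) := by
  unfold Pre_dictionary_to_do_int_list; infer_instance
def pvWitness_dictionary_to_do_int_list : (List (Int × Int)) := [(0, 5), (2, 9)]

def Spec_dictionary_to_do_int_list (dictionary : List (Int × Int)) (out : List Int) : Prop := out = dictionary_to_do_int_list_alt dictionary
instance (dictionary : List (Int × Int)) (out : List Int) : Decidable (Spec_dictionary_to_do_int_list dictionary out) := by unfold Spec_dictionary_to_do_int_list; infer_instance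

-- ===== CLAIM (what is proved, stated in full; the proofs are below) =====
def Claim_equal_dictionary_to_do_int_list : Prop := ∀ (dictionary : List (Int × Int)), Dom_dictionary_to_do_int_list dictionary → Pre_dictionary_to_do_int_list dictionary → Spec_dictionary_to_do_int_list dictionary (dictionary_to_do_int_list dictionary)

-- ===== LEMMAS AND PROOFS =====

-- B's scatter step.
def pvStep (m : Int) : List Int → (Int × Int) → List Int :=
  fun r kv => if 0 ≤ kv.1 ∧ kv.1 ≤ m then r.set kv.1.toNat kv.2 else r

theorem pvStep_length (m : Int) (r : List Int) (kv : Int × Int) :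
    (pvStep m r kv).length = r.length := by
  unfold pvStep; split <;> simp

theorem pvScatter_length (m : Int) (d : List (Int × Int)) (r : List Int) :
    (d.foldl (pvStep m) r).length = r.length := by
  induction d generalizing r with
  | nil => rfl
  | cons kv t ih => simp [List.foldl_cons, ih, pvStep_length]

-- Value at index i after the scatter: the dict's entry for i if present, else whatever r held.
theorem pvScatter_getElem? (m : Int) (d : List (Int × Int)) (r : List Int)
    (hnd : (d.map Prod.fst).Nodup) (hle : ∀ k ∈ d.map Prod.fst, k ≤ m)
    (i : Nat) (hi : i < r.length) :
    (d.foldl (pvStep m) r)[i]? = ((PySem.Dict.mk d).get? (i : Int)).or r[i]? := by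
  induction d generalizing r with
  | nil => simp [PySem.Dict.get?]
  | cons kv t ih =>
    obtain ⟨k, v⟩ := kv
    simp only [List.map_cons, List.nodup_cons] at hnd
    have hk : k ≤ m := hle k (by simp)
    rw [List.foldl_cons, PySem.Dict.get?_mk_cons]
    by_cases hki : k = (i : Int)
    · -- this entry lands exactly at slot i; no later entry has key k
      have hkn : (PySem.Dict.mk t).get? (i : Int) = none := by
        rw [PySem.Dict.get?_eq_none_iff_not_mem_keys]
        simpa [PySem.Dict.keys, ← hki] using hnd.1
      have hstep : pvStep m r (k, v) = r.set i v := by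
        unfold pvStep
        rw [if_pos ⟨by omega, hk⟩]
        simp [hki]
      rw [hstep, ih (r.set i v) hnd.2 (fun x hx => hle x (by simp [hx]))
        (by simpa using hi), hkn, hki]
      simp [hi]
    · -- key ≠ i : the step leaves slot i unchanged
      have hstep : (pvStep m r (k, v))[i]? = r[i]? := by
        unfold pvStep
        split
        · next h =>
          have : k.toNat ≠ i := by omega
          simp [List.getElem?_set_ne this]
        · rfl
      rw [ih (pvStep m r (k, v)) hnd.2 (fun x hx => hle x (by simp [hx]))
        (by rw [pvStep_length]; exact hi), hstep]
      simp [beq_iff_eq, hki]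

-- ===== VERDICT (by name: the statement is the Claim_ definition above) =====
theorem dictionary_to_do_int_list_spec : Claim_equal_dictionary_to_do_int_list := by
  intro d _ hpre
  unfold Spec_dictionary_to_do_int_list dictionary_to_do_int_list dictionary_to_do_int_list_alt
  cases hmax : PySem.List.max? (d.map Prod.fst) (fun k => k) with
  | none =>
    exact absurd (by simpa using (PySem.List.max?_eq_none_iff _ _).mp hmax) hpre.1
  | some m =>
    have hle : ∀ k ∈ d.map Prod.fst, k ≤ m := fun k hk =>
      PySem.List.max?_isMax hmax k hk
    simp only
    rw [show (fun (r : List Int) (kv : Int × Int) =>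
      if 0 ≤ kv.1 ∧ kv.1 ≤ m then r.set kv.1.toNat kv.2 else r) = pvStep m from rfl]
    congr 1
    -- A's loop appends (get? d count).getD 0 for each count
    have hfun : (fun (acc : List Int) count =>
        match PySem.Dict.get? (PySem.Dict.mk d) count with
        | some v => acc ++ [v]
        | none   => acc ++ [0]) =
        fun acc count => acc ++ [((PySem.Dict.mk d).get? count).getD 0] := by
      funext acc c
      cases PySem.Dict.get? (PySem.Dict.mk d) c <;> rfl
    rw [hfun, PySem.List.foldl_append_singleton_eq_map]
    apply List.ext_getElem?
    intro i
    by_cases hi : i < (m + 1).toNat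
    · rw [pvScatter_getElem? m d _ hpre.2 hle i
        (by rw [List.length_replicate]; exact hi)]
      have h1 : (PySem.List.pyRange 0 (m + 1) 1)[i]? = some ((0 : Int) + i) := by
        simp [PySem.List.length_pyRange_one, hi]
      simp only [List.nil_append, List.getElem?_map, h1, Option.map_some]
      rw [List.getElem?_replicate]
      simp only [if_pos hi, Int.zero_add]
      cases (PySem.Dict.mk d).get? (i : Int) <;> rfl
    · rw [List.getElem?_eq_none (by
          simp [PySem.List.length_pyRange_one]; omega),
        List.getElem?_eq_none (by
          rw [pvScatter_length, List.length_replicate]; omega)]
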